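-- pv_equiv track=rewrite | github.com/matt-barron/csci127-assignments | lab_04/lady.py | noUnhappy
-- ===== SOURCE A (Python) =====
-- def noUnhappy(b):
--    alpha=["A","B","C","D","E","F","G","H","I","J","K","L","M","N","O","P","Q","R","S","T","U","V","W","X","Y","Z"]
--    happy=False
--    for i in range(len(b)):
--         if b[i] not in alpha and b[i] == "_":
--             happy= True
--         else:
--             happy=False
--    return happy
-- ===== SOURCE B (Python) =====
-- def noUnhappy(b):
--     return bool(b) and b[-1] == "_"
-- ===== Notes on version B (the rewrite author's own statement) =====
-- stated objective: faster
-- what changed: Replaces A's O(n) loop (whose flag is overwritten each iteration, so only the last character matters) with a closed-form O(1) test of the last character.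
import Mathlib
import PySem

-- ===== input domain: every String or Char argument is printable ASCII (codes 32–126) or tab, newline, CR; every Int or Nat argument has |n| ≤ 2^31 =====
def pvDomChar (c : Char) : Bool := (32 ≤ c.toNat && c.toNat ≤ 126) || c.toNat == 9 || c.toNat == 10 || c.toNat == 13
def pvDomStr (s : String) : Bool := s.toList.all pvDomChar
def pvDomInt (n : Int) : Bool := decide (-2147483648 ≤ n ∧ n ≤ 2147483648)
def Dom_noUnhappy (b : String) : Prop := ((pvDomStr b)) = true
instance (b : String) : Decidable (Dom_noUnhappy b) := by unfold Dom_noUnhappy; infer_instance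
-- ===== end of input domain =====

-- B replaces A's whole loop (whose flag is overwritten every iteration, so only the
-- last character matters) with a direct test of the last character; simpler, same values.

-- ===== PORT A =====
def pvAlpha : List Char :=
  ['A','B','C','D','E','F','G','H','I','J','K','L','M',
   'N','O','P','Q','R','S','T','U','V','W','X','Y','Z']

def noUnhappy (b : String) : Bool :=
  (PySem.List.pyRange 0 (PySem.Str.len b) 1).foldl
    (fun happy i =>
      match PySem.Str.pyGet? b i with
      | some c => if (!pvAlpha.contains c) && (c == '_') then true else false
      | none => happy)
    false

-- ===== PORT B =====
def noUnhappy_alt (b : String) : Bool :=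
  if PySem.Str.len b = 0 then false
  else PySem.Str.pyGet? b (-1) == some '_'

-- ===== PRECONDITION & SPEC =====
def Spec_noUnhappy (b : String) (out : Bool) : Prop := out = noUnhappy_alt b
instance (b : String) (out : Bool) : Decidable (Spec_noUnhappy b out) := by unfold Spec_noUnhappy; infer_instance

-- ===== CLAIM (what is proved, stated in full; the proofs are below) =====
def Claim_equal_noUnhappy : Prop := ∀ (b : String), Dom_noUnhappy b → Spec_noUnhappy b (noUnhappy b)

-- ===== LEMMAS AND PROOFS =====

-- A's fold over the indices of xs ++ [x]: the final iteration overwrites the flag,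
-- so the result depends only on the last character x.
theorem pv_fold_concat (xs : List Char) (x : Char) (init : Bool) :
    (PySem.List.pyRange 0 ((xs ++ [x]).length : Int) 1).foldl
      (fun happy i =>
        match PySem.List.pyGet? (xs ++ [x]) i with
        | some c => if (!pvAlpha.contains c) && (c == '_') then true else false
        | none => happy)
      init
    = ((!pvAlpha.contains x) && (x == '_')) := by
  have hlen : ((xs ++ [x]).length : Int) = (xs.length : Int) + 1 := by
    simp
  rw [hlen, PySem.List.pyRange_one_succ_right (by positivity), List.foldl_append]
  simp [Bool.beq_eq_decide_eq]

theorem noUnhappy_eq_alt (b : String) : noUnhappy b = noUnhappy_alt b := by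
  rcases List.eq_nil_or_concat b.toList with h | ⟨xs, x, h⟩
  · simp [noUnhappy, noUnhappy_alt, h, PySem.Str.len_eq]
  · have hA : noUnhappy b = ((!pvAlpha.contains x) && (x == '_')) := by
      have := pv_fold_concat xs x false
      simpa [noUnhappy, PySem.Str.len_eq, h] using this
    have hB : noUnhappy_alt b = (x == '_') := by
      simp [noUnhappy_alt, PySem.Str.len_eq, h, PySem.List.pyGet?_neg_one]
      omega
    rw [hA, hB]
    by_cases hx : x = '_'
    · subst hx; decide
    · simp [hx]

-- ===== VERDICT (by name: the statement is the Claim_ definition above) =====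
theorem noUnhappy_spec : Claim_equal_noUnhappy := by
  intro b _; exact noUnhappy_eq_alt b
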